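-- pv_equiv track=rewrite | github.com/kenbockler/Andmeteaduse_masin-ppe_projekt | PROJEKT/K10/S211/2021-11-03-20-59-03/kodu1.py | grupeeri
-- ===== SOURCE A (Python) =====
-- def erinevad_sümbolid(sõne):
--     hulk = set(sõne)
--     return hulk
--
-- def sümbolite_sagedus(sõne1):
--     sümbolid = list(sõne1)
--     sõnastik = {}
--     for el in sümbolid:
--         arv = sümbolid.count(el)
--         sõnastik[el] = arv
--     return(sõnastik)
--
-- def grupeeri(sõne2):
--     täishäälikud = {'a', 'e', 'i', 'o', 'u', 'õ', 'ä', 'ö', 'ü', 'A', 'E', 'I', 'O', 'U', 'Õ', 'Ä', 'Ö', 'Ü'}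
--     kaashäälikud = set("bcdfghjklmnpqrsšzžtvwxyBCDFGHJKLMNPQRSŠZŽTUVWXY")
--     grupeering={}
--     täis_hulk = set()
--     kaas_hulk = set()
--     muu_hulk = set()
--     for el in erinevad_sümbolid(sõne2):
--         if el in täishäälikud:
--             sagedus_dict = sümbolite_sagedus(sõne2)
--             korduvus = sagedus_dict[el]
--             täis_hulk.add((el, korduvus))
--         elif el in kaashäälikud:
--             sagedus_dict = sümbolite_sagedus(sõne2)
--             korduvus = sagedus_dict[el]
--             kaas_hulk.add((el, korduvus))
--         else:
--             sagedus_dict = sümbolite_sagedus(sõne2)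
--             korduvus = sagedus_dict[el]
--             muu_hulk.add((el, korduvus))
--     grupeering["Täishäälikud"] = täis_hulk
--     grupeering["Kaashäälikud"] = kaas_hulk
--     grupeering["Muud"] = muu_hulk
--     return(grupeering)
-- ===== SOURCE B (Python) =====
-- def grupeeri(sõne2):
--     täishäälikud = set('aeiouõäöüAEIOUÕÄÖÜ')
--     kaashäälikud = set("bcdfghjklmnpqrsšzžtvwxyBCDFGHJKLMNPQRSŠZŽTUVWXY")
--     täis, kaas, muu = {}, {}, {}
--     for c in sõne2:
--         if c in täishäälikud:
--             d = täis
--         elif c in kaashäälikud: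
--             d = kaas
--         else:
--             d = muu
--         d[c] = d.get(c, 0) + 1
--     return {"Täishäälikud": {(c, n) for c, n in täis.items()},
--             "Kaashäälikud": {(c, n) for c, n in kaas.items()},
--             "Muud": {(c, n) for c, n in muu.items()}}
-- ===== Notes on version B (the rewrite author's own statement) =====
-- stated objective: faster
-- what changed: One classify-and-count pass over the string maintaining three per-class dicts replaces A's loop over the distinct-symbol set that rebuilds the full frequency dict (itself quadratic via list.count) for every symbol.
import Mathlib
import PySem

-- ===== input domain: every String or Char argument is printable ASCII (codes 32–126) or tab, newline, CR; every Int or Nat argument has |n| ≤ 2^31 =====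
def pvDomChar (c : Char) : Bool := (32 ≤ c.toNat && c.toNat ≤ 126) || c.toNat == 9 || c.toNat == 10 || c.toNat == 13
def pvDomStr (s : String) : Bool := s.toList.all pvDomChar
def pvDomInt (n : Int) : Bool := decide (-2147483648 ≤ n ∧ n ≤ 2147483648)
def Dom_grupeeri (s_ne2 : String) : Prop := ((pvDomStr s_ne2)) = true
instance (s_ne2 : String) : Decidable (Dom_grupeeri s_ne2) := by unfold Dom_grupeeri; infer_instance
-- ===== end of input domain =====

-- B replaces A's repeated whole-string frequency passes over the distinct-symbol set by one
-- classify-and-count pass over the string maintaining three dicts (objective: faster).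

-- ===== PORT A =====
def pvTaishaalikud : PySem.Set Char :=
  PySem.Set.ofList ['a', 'e', 'i', 'o', 'u', 'õ', 'ä', 'ö', 'ü', 'A', 'E', 'I', 'O', 'U', 'Õ', 'Ä', 'Ö', 'Ü']

def pvKaashaalikud : PySem.Set Char :=
  PySem.Set.ofList "bcdfghjklmnpqrsšzžtvwxyBCDFGHJKLMNPQRSŠZŽTUVWXY".toList

def erinevadSymbolid (s_ne : String) : PySem.Set Char :=
  PySem.Set.ofList s_ne.toList

def symboliteSagedus (s_ne1 : String) : PySem.Dict Char Int :=
  let symbolid := s_ne1.toList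
  symbolid.foldl (fun d el => d.insert el ((symbolid.count el : Int))) PySem.Dict.empty

def grupeeri (s_ne2 : String) : List (String × List (String × Int)) :=
  let st :=
    (erinevadSymbolid s_ne2).foldl
      (fun (acc : PySem.Set (String × Int) × PySem.Set (String × Int) × PySem.Set (String × Int)) el =>
        if pvTaishaalikud.contains el then
          -- sagedus_dict[el]: el is a symbol of s_ne2, so the key is always present and the
          -- KeyError branch (get? = none) is unreachable; getD 0 is exact here
          (PySem.Set.add acc.1 (String.ofList [el], ((symboliteSagedus s_ne2).get? el).getD 0), acc.2.1, acc.2.2)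
        else if pvKaashaalikud.contains el then
          (acc.1, PySem.Set.add acc.2.1 (String.ofList [el], ((symboliteSagedus s_ne2).get? el).getD 0), acc.2.2)
        else
          (acc.1, acc.2.1, PySem.Set.add acc.2.2 (String.ofList [el], ((symboliteSagedus s_ne2).get? el).getD 0)))
      (PySem.Set.empty, PySem.Set.empty, PySem.Set.empty)
  [("Täishäälikud", st.1), ("Kaashäälikud", st.2.1), ("Muud", st.2.2)]

-- ===== PORT B =====
def pvItemsToSet (d : PySem.Dict Char Int) : PySem.Set (String × Int) :=
  PySem.Set.ofList (d.items.map (fun p => (String.ofList [p.1], p.2)))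

def grupeeri_alt (s_ne2 : String) : List (String × List (String × Int)) :=
  let st :=
    s_ne2.toList.foldl
      (fun (acc : PySem.Dict Char Int × PySem.Dict Char Int × PySem.Dict Char Int) c =>
        if pvTaishaalikud.contains c then
          (acc.1.insert c (acc.1.getD c 0 + 1), acc.2.1, acc.2.2)
        else if pvKaashaalikud.contains c then
          (acc.1, acc.2.1.insert c (acc.2.1.getD c 0 + 1), acc.2.2)
        else
          (acc.1, acc.2.1, acc.2.2.insert c (acc.2.2.getD c 0 + 1)))
      (PySem.Dict.empty, PySem.Dict.empty, PySem.Dict.empty)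
  [("Täishäälikud", pvItemsToSet st.1), ("Kaashäälikud", pvItemsToSet st.2.1), ("Muud", pvItemsToSet st.2.2)]

-- ===== PRECONDITION & SPEC =====
def Spec_grupeeri (s_ne2 : String) (out : List (String × List (String × Int))) : Prop := out = grupeeri_alt s_ne2
instance (s_ne2 : String) (out : List (String × List (String × Int))) : Decidable (Spec_grupeeri s_ne2 out) := by unfold Spec_grupeeri; infer_instance

-- ===== CLAIM (what is proved, stated in full; the proofs are below) =====
def Claim_equal_grupeeri : Prop := ∀ (s_ne2 : String), Dom_grupeeri s_ne2 → Spec_grupeeri s_ne2 (grupeeri s_ne2)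

-- ===== LEMMAS AND PROOFS =====

-- the three classification predicates, in the branch order both programs test
def pvP0 (c : Char) : Bool := pvTaishaalikud.contains c
def pvP1 (c : Char) : Bool := !pvTaishaalikud.contains c && pvKaashaalikud.contains c
def pvP2 (c : Char) : Bool := !pvTaishaalikud.contains c && !pvKaashaalikud.contains c

-- the pair A stores for a symbol of s
def pvPairOf (s : String) (c : Char) : String × Int := (String.ofList [c], (s.toList.count c : Int))

-- A's frequency dict maps every symbol to its count in the whole string
lemma get?_sagedus_fold (full : List Char) (l : List Char) (d : PySem.Dict Char Int) (k : Char) :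
    (l.foldl (fun d el => d.insert el ((full.count el : Int))) d).get? k
      = if k ∈ l then some ((full.count k : Int)) else d.get? k := by
  induction l generalizing d with
  | nil => simp
  | cons a l ih =>
      simp only [List.foldl_cons, ih, PySem.Dict.get?_insert, List.mem_cons]
      by_cases h : k ∈ l
      · simp [h]
      · by_cases hk : k = a <;> simp [h, hk]

lemma sagedus_lookup (s : String) (el : Char) (h : el ∈ s.toList) :
    ((symboliteSagedus s).get? el).getD 0 = (s.toList.count el : Int) := by
  simp [symboliteSagedus, get?_sagedus_fold, h]

-- Set.ofList commutes with filter
lemma ofList_filter {α : Type} [BEq α] [LawfulBEq α] (p : α → Bool) (l : List α) :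
    PySem.Set.ofList (l.filter p) = (PySem.Set.ofList l).filter p := by
  induction l with
  | nil => rfl
  | cons a l ih =>
      by_cases hp : p a
      · rw [List.filter_cons_of_pos hp, PySem.Set.ofList_cons, PySem.Set.ofList_cons, ih]
        simp only [PySem.Set.discard, List.filter_cons_of_pos hp]
        rw [List.filter_comm]
      · rw [List.filter_cons_of_neg hp, ih, PySem.Set.ofList_cons,
            List.filter_cons_of_neg hp]
        simp only [PySem.Set.discard]
        rw [List.filter_comm]
        refine (List.filter_eq_self.mpr ?_).symm
        intro x hx
        have hpx := List.of_mem_filter hx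
        have hne : x ≠ a := by rintro rfl; exact hp hpx
        simp [hne]

-- B's triple fold computes the three per-class counting folds over the filtered string
lemma bfold (l : List Char) (t k m : PySem.Dict Char Int) :
    l.foldl
      (fun (acc : PySem.Dict Char Int × PySem.Dict Char Int × PySem.Dict Char Int) c =>
        if pvTaishaalikud.contains c then
          (acc.1.insert c (acc.1.getD c 0 + 1), acc.2.1, acc.2.2)
        else if pvKaashaalikud.contains c then
          (acc.1, acc.2.1.insert c (acc.2.1.getD c 0 + 1), acc.2.2)
        else
          (acc.1, acc.2.1, acc.2.2.insert c (acc.2.2.getD c 0 + 1)))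
      (t, k, m)
    = ((l.filter pvP0).foldl (fun d c => d.insert c (d.getD c 0 + 1)) t,
       (l.filter pvP1).foldl (fun d c => d.insert c (d.getD c 0 + 1)) k,
       (l.filter pvP2).foldl (fun d c => d.insert c (d.getD c 0 + 1)) m) := by
  induction l generalizing t k m with
  | nil => rfl
  | cons a l ih =>
      by_cases h0 : a ∈ pvTaishaalikud
      · have hc0 : pvTaishaalikud.contains a = true := by
          simpa [PySem.Set.contains] using h0
        rw [List.foldl_cons, if_pos hc0, ih]
        simp [pvP0, pvP1, pvP2, PySem.Set.contains, h0]
      · have hc0 : ¬ pvTaishaalikud.contains a = true := fun hc =>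
          h0 (by simpa [PySem.Set.contains] using hc)
        by_cases h1 : a ∈ pvKaashaalikud
        · have hc1 : pvKaashaalikud.contains a = true := by
            simpa [PySem.Set.contains] using h1
          rw [List.foldl_cons, if_neg hc0, if_pos hc1, ih]
          simp [pvP0, pvP1, pvP2, PySem.Set.contains, h0, h1]
        · have hc1 : ¬ pvKaashaalikud.contains a = true := fun hc =>
            h1 (by simpa [PySem.Set.contains] using hc)
          rw [List.foldl_cons, if_neg hc0, if_neg hc1, ih]
          simp [pvP0, pvP1, pvP2, PySem.Set.contains, h0, h1]

-- A's triple fold, on a duplicate-free list of symbols of s, appends the per-class pair lists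
lemma afold (s : String) (l : List Char) (t k m : PySem.Set (String × Int))
    (hnd : l.Nodup) (hsub : ∀ c ∈ l, c ∈ s.toList)
    (ht : ∀ c ∈ l, ∀ p ∈ t, p.1 ≠ String.ofList [c])
    (hk : ∀ c ∈ l, ∀ p ∈ k, p.1 ≠ String.ofList [c])
    (hm : ∀ c ∈ l, ∀ p ∈ m, p.1 ≠ String.ofList [c]) :
    l.foldl
      (fun (acc : PySem.Set (String × Int) × PySem.Set (String × Int) × PySem.Set (String × Int)) el =>
        if pvTaishaalikud.contains el then
          (PySem.Set.add acc.1 (String.ofList [el], ((symboliteSagedus s).get? el).getD 0), acc.2.1, acc.2.2)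
        else if pvKaashaalikud.contains el then
          (acc.1, PySem.Set.add acc.2.1 (String.ofList [el], ((symboliteSagedus s).get? el).getD 0), acc.2.2)
        else
          (acc.1, acc.2.1, PySem.Set.add acc.2.2 (String.ofList [el], ((symboliteSagedus s).get? el).getD 0)))
      (t, k, m)
    = (t ++ (l.filter pvP0).map (pvPairOf s),
       k ++ (l.filter pvP1).map (pvPairOf s),
       m ++ (l.filter pvP2).map (pvPairOf s)) := by
  induction l generalizing t k m with
  | nil => simp
  | cons a l ih =>
      have hmem : a ∈ s.toList := hsub a (List.mem_cons_self)
      have hpair : (String.ofList [a], ((symboliteSagedus s).get? a).getD 0) = pvPairOf s a := by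
        rw [sagedus_lookup s a hmem]; rfl
      have hfresh : ∀ (u : PySem.Set (String × Int)),
          (∀ c ∈ a :: l, ∀ p ∈ u, p.1 ≠ String.ofList [c]) →
          PySem.Set.add u (pvPairOf s a) = u ++ [pvPairOf s a] := by
        intro u hu
        have : ¬ (pvPairOf s a) ∈ u := fun hin =>
          hu a List.mem_cons_self _ hin rfl
        simp [PySem.Set.add, PySem.Set.contains, this]
      have hstep : ∀ (u : PySem.Set (String × Int)),
          (∀ c ∈ a :: l, ∀ p ∈ u, p.1 ≠ String.ofList [c]) →
          ∀ c ∈ l, ∀ p ∈ u ++ [pvPairOf s a], p.1 ≠ String.ofList [c] := by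
        intro u hu c hc p hp
        rcases List.mem_append.mp hp with h | h
        · exact hu c (List.mem_cons_of_mem _ hc) p h
        · rcases List.mem_singleton.mp h with rfl
          simp only [pvPairOf]
          intro hEq
          have : a = c := by
            have := congrArg String.toList hEq
            simpa using this
          exact (List.nodup_cons.mp hnd).1 (this ▸ hc)
      have hnd' := (List.nodup_cons.mp hnd).2
      have hsub' : ∀ c ∈ l, c ∈ s.toList := fun c hc => hsub c (List.mem_cons_of_mem _ hc)
      have htl : ∀ c ∈ l, ∀ p ∈ t, p.1 ≠ String.ofList [c] :=
        fun c hc => ht c (List.mem_cons_of_mem _ hc)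
      have hkl : ∀ c ∈ l, ∀ p ∈ k, p.1 ≠ String.ofList [c] :=
        fun c hc => hk c (List.mem_cons_of_mem _ hc)
      have hml : ∀ c ∈ l, ∀ p ∈ m, p.1 ≠ String.ofList [c] :=
        fun c hc => hm c (List.mem_cons_of_mem _ hc)
      by_cases h0 : a ∈ pvTaishaalikud
      · have hc0 : pvTaishaalikud.contains a = true := by
          simpa [PySem.Set.contains] using h0
        rw [List.foldl_cons, if_pos hc0, hpair, hfresh t ht,
          ih (t ++ [pvPairOf s a]) k m hnd' hsub' (hstep t ht) hkl hml]
        simp [pvP0, pvP1, pvP2, PySem.Set.contains, h0]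
      · have hc0 : ¬ pvTaishaalikud.contains a = true := fun hc =>
          h0 (by simpa [PySem.Set.contains] using hc)
        by_cases h1 : a ∈ pvKaashaalikud
        · have hc1 : pvKaashaalikud.contains a = true := by
            simpa [PySem.Set.contains] using h1
          rw [List.foldl_cons, if_neg hc0, if_pos hc1, hpair, hfresh k hk,
            ih t (k ++ [pvPairOf s a]) m hnd' hsub' htl (hstep k hk) hml]
          simp [pvP0, pvP1, pvP2, PySem.Set.contains, h0, h1]
        · have hc1 : ¬ pvKaashaalikud.contains a = true := fun hc =>
            h1 (by simpa [PySem.Set.contains] using hc)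
          rw [List.foldl_cons, if_neg hc0, if_neg hc1, hpair, hfresh m hm,
            ih t k (m ++ [pvPairOf s a]) hnd' hsub' htl hkl (hstep m hm)]
          simp [pvP0, pvP1, pvP2, PySem.Set.contains, h0, h1]

-- one group of B equals the corresponding group of A
lemma group_eq (s : String) (p : Char → Bool) :
    pvItemsToSet ((s.toList.filter p).foldl (fun d c => d.insert c (d.getD c 0 + 1)) PySem.Dict.empty)
      = ((PySem.Set.ofList s.toList).filter p).map (pvPairOf s) := by
  have hcounter :
      (s.toList.filter p).foldl (fun d c => d.insert c (d.getD c 0 + 1)) PySem.Dict.empty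
        = PySem.Dict.counter (s.toList.filter p) := rfl
  rw [hcounter]
  unfold pvItemsToSet
  rw [PySem.Dict.items_counter, List.map_map]
  have hnd : (PySem.Set.ofList (s.toList.filter p)).Nodup := PySem.Set.nodup_ofList _
  have hmapnd : (List.map ((fun q => (String.ofList [q.1], q.2)) ∘
      fun c => (c, ((s.toList.filter p).count c : Int))) (PySem.Set.ofList (s.toList.filter p))).Nodup := by
    refine hnd.map ?_
    intro x y hxy
    simp only [Function.comp, Prod.mk.injEq] at hxy
    have := congrArg String.toList hxy.1
    simpa using this
  rw [PySem.Set.ofList_eq_self_of_nodup _ hmapnd, ofList_filter]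
  apply List.map_congr_left
  intro c hc
  have hp : p c = true := List.of_mem_filter hc
  simp only [Function.comp, pvPairOf, Prod.mk.injEq, true_and]
  rw [List.count_filter hp]

-- ===== VERDICT (by name: the statement is the Claim_ definition above) =====
theorem grupeeri_spec : Claim_equal_grupeeri := by
  intro s _
  show grupeeri s = grupeeri_alt s
  unfold grupeeri grupeeri_alt erinevadSymbolid
  rw [afold s (PySem.Set.ofList s.toList) PySem.Set.empty PySem.Set.empty PySem.Set.empty
        (PySem.Set.nodup_ofList _) (fun c hc => (PySem.Set.mem_ofList _ _).mp hc)
        (by intro c _ p hp; cases hp) (by intro c _ p hp; cases hp) (by intro c _ p hp; cases hp),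
      bfold]
  simp only [group_eq, PySem.Set.empty, List.nil_append]
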